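-- pv_equiv track=rewrite | github.com/team-7-ELEVEN/one-day-one-solve | 송가람/review/키패드 누르기.py | solution
-- ===== SOURCE A (Python) =====
-- def solution(numbers, hand):
--     def distance(a, b):
--         return abs(table[a][0] - table[b][0]) + abs(table[a][1] - table[b][1])
--
--     ans = ""
--     table = {}
--     i = 0
--     n = 1
--
--     for _ in range(3):
--         for j in range(3):
--             table[n] = [i, j]
--             n += 1
--         i += 1
--
--     table["*"] = [3, 0]
--     table[0] = [3, 1]
--     table["#"] = [3, 2]
--
--     left_hand = "*"
--     right_hand = "#"
--
--     for i in numbers: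
--         if i in [1, 4, 7]:
--             ans += "L"
--             left_hand = i
--         elif i in [3, 6, 9]:
--             ans += "R"
--             right_hand = i
--         elif i in [2, 5, 8, 0]:
--             if distance(i, left_hand) > distance(i, right_hand):
--                 ans += "R"
--                 right_hand = i
--             elif distance(i, left_hand) == distance(i, right_hand):
--                 if hand == "left":
--                     ans += "L"
--                     left_hand = i
--                 else:
--                     ans += "R"
--                     right_hand = i
--             else:
--                 ans += "L"
--                 left_hand = i
--
--     return ans
-- ===== SOURCE B (Python) =====
-- def solution(numbers, hand):
--     # precompute a finite transition table (DFA) over all 64 thumb-position pairs,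
--     # then run the input through it with plain dict lookups
--     def pos(n):
--         return (3, 1) if n == 0 else ((n - 1) // 3, (n - 1) % 3)
--     tie_left = (hand == "left")
--     lefts = [(3, 0)] + [pos(d) for d in (1, 4, 7, 2, 5, 8, 0)]
--     rights = [(3, 2)] + [pos(d) for d in (3, 6, 9, 2, 5, 8, 0)]
--     trans = {}
--     for L in lefts:
--         for R in rights:
--             for d in range(10):
--                 r, c = pos(d)
--                 if c == 0:
--                     trans[(L, R, d)] = ("L", (r, c), R)
--                 elif c == 2:
--                     trans[(L, R, d)] = ("R", L, (r, c))
--                 else: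
--                     dl = abs(r - L[0]) + abs(c - L[1])
--                     dr = abs(r - R[0]) + abs(c - R[1])
--                     if dl < dr or (dl == dr and tie_left):
--                         trans[(L, R, d)] = ("L", (r, c), R)
--                     else:
--                         trans[(L, R, d)] = ("R", L, (r, c))
--     out = []
--     L, R = (3, 0), (3, 2)
--     for n in numbers:
--         t = trans.get((L, R, n))
--         if t is not None:
--             ch, L, R = t
--             out.append(ch)
--     return "".join(out)
-- ===== Notes on version B (the rewrite author's own statement) =====
-- stated objective: alternative
-- what changed: B precomputes a complete finite transition table (a DFA over all 64 reachable left/right thumb-position pairs x 10 digits, with coordinates derived arithmetically) and then replays the input with plain table lookups, instead of A's per-press branch-and-distance simulation over a digit-keyed position dict; B also collects the letters in a list joined at the end.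
import Mathlib
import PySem

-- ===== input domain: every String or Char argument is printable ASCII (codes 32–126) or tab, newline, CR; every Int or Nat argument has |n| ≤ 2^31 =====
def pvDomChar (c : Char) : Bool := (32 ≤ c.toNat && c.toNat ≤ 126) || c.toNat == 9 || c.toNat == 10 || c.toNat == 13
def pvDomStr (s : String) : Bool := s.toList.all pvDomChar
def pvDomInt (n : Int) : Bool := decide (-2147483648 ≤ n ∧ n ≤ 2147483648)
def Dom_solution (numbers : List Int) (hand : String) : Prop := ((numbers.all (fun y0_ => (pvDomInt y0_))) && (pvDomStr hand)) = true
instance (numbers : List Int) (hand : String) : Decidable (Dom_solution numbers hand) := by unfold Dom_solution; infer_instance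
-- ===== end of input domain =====

-- B precomputes a complete transition table over all 64 thumb-position pairs and replays
-- the input with table lookups, instead of A's per-press branch/distance simulation
-- (objective: alternative — a different algorithm of the same cost).

-- ===== PORT A =====
-- Keys of A's dict are the ints 0..9 plus the strings "*" and "#": modelled as a sum-like type.
inductive PKey : Type
  | num : Int → PKey
  | star : PKey
  | hash : PKey
deriving DecidableEq, Repr

-- the table built by A's nested 'for _ in range(3): for j in range(3):' loops plus the three inserts
def pvTableA : PySem.Dict PKey (List Int) :=
  let st := (PySem.List.pyRange 0 3 1).foldl
    (fun (st : PySem.Dict PKey (List Int) × Int × Int) _ =>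
      let inner := (PySem.List.pyRange 0 3 1).foldl
        (fun (s2 : PySem.Dict PKey (List Int) × Int) j =>
          (s2.1.insert (PKey.num s2.2) [st.2.1, j], s2.2 + 1))
        (st.1, st.2.2)
      (inner.1, st.2.1 + 1, inner.2))
    (PySem.Dict.empty, 0, 1)
  ((st.1.insert PKey.star [3, 0]).insert (PKey.num 0) [3, 1]).insert PKey.hash [3, 2]

-- distance(a, b): table[a][0] etc.; in A the keys looked up are always present and the
-- values have length 2, so getD/pyGetD with defaults is exact on every reachable call
def pvDistance (a b : PKey) : Int :=
  let pa := PySem.Dict.getD pvTableA a []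
  let pb := PySem.Dict.getD pvTableA b []
  |PySem.List.pyGetD pa 0 0 - PySem.List.pyGetD pb 0 0| +
    |PySem.List.pyGetD pa 1 0 - PySem.List.pyGetD pb 1 0|

-- the body of A's 'for i in numbers' loop, over state (ans, left_hand, right_hand)
def pvStepA (hand : String) (st : String × PKey × PKey) (i : Int) : String × PKey × PKey :=
  let (ans, lh, rh) := st
  if [(1 : Int), 4, 7].contains i then (ans ++ "L", PKey.num i, rh)
  else if [(3 : Int), 6, 9].contains i then (ans ++ "R", lh, PKey.num i)
  else if [(2 : Int), 5, 8, 0].contains i then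
    if pvDistance (PKey.num i) lh > pvDistance (PKey.num i) rh then
      (ans ++ "R", lh, PKey.num i)
    else if pvDistance (PKey.num i) lh = pvDistance (PKey.num i) rh then
      if hand == "left" then (ans ++ "L", PKey.num i, rh)
      else (ans ++ "R", lh, PKey.num i)
    else (ans ++ "L", PKey.num i, rh)
  else st

def solution (numbers : List Int) (hand : String) : String :=
  (numbers.foldl (pvStepA hand) ("", PKey.star, PKey.hash)).1

-- ===== PORT B =====
-- pos(n): grid coordinate of digit n by arithmetic
def pvPosB (n : Int) : Int × Int :=
  if n = 0 then ((3 : Int), (1 : Int))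
  else (PySem.Int.floordiv (n - 1) 3, PySem.Int.mod (n - 1) 3)

-- all positions the left thumb can ever occupy, resp. the right thumb
def pvLefts : List (Int × Int) :=
  [((3 : Int), (0 : Int))] ++ ([1, 4, 7, 2, 5, 8, 0] : List Int).map pvPosB

def pvRights : List (Int × Int) :=
  [((3 : Int), (2 : Int))] ++ ([3, 6, 9, 2, 5, 8, 0] : List Int).map pvPosB

-- the triple 'for L: for R: for d in range(10)' loops filling the transition dict
def pvBuild (tieLeft : Bool) :
    PySem.Dict ((Int × Int) × (Int × Int) × Int) (String × (Int × Int) × (Int × Int)) :=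
  pvLefts.foldl (fun d0 L =>
    pvRights.foldl (fun d1 R =>
      (PySem.List.pyRange 0 10 1).foldl (fun d2 dd =>
        let p := pvPosB dd
        if p.2 = 0 then d2.insert (L, R, dd) ("L", p, R)
        else if p.2 = 2 then d2.insert (L, R, dd) ("R", L, p)
        else
          let dl := |p.1 - L.1| + |p.2 - L.2|
          let dr := |p.1 - R.1| + |p.2 - R.2|
          if dl < dr ∨ (dl = dr ∧ tieLeft = true) then d2.insert (L, R, dd) ("L", p, R)
          else d2.insert (L, R, dd) ("R", L, p)) d1) d0) PySem.Dict.empty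

-- the body of B's run loop: trans.get((L, R, n)), skipping on a missing key
def pvRunStep (trans : PySem.Dict ((Int × Int) × (Int × Int) × Int) (String × (Int × Int) × (Int × Int)))
    (st : List String × (Int × Int) × (Int × Int)) (n : Int) :
    List String × (Int × Int) × (Int × Int) :=
  match trans.get? (st.2.1, st.2.2, n) with
  | none => st
  | some t => (st.1 ++ [t.1], t.2.1, t.2.2)

def solution_alt (numbers : List Int) (hand : String) : String :=
  let tieLeft := hand == "left"
  let trans := pvBuild tieLeft
  PySem.Str.join ""
    (numbers.foldl (pvRunStep trans) ([], ((3 : Int), (0 : Int)), ((3 : Int), (2 : Int)))).1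

-- ===== PRECONDITION & SPEC =====
def Spec_solution (numbers : List Int) (hand : String) (out : String) : Prop := out = solution_alt numbers hand
instance (numbers : List Int) (hand : String) (out : String) : Decidable (Spec_solution numbers hand out) := by unfold Spec_solution; infer_instance

-- ===== CLAIM (what is proved, stated in full; the proofs are below) =====
def Claim_equal_solution : Prop := ∀ (numbers : List Int) (hand : String), Dom_solution numbers hand → Spec_solution numbers hand (solution numbers hand)

-- ===== LEMMAS AND PROOFS =====

-- '"".join(out ++ [y])' grows by y
lemma pvJoin_append (xs : List String) (y : String) :
    PySem.Str.join "" (xs ++ [y]) = PySem.Str.join "" xs ++ y := by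
  have flat_int : ∀ (l : List (List Char)) (a : List Char),
      (List.intersperse ([] : List Char) (l ++ [a])).flatten =
        (List.intersperse ([] : List Char) l).flatten ++ a := by
    intro l a
    induction l with
    | nil => simp
    | cons x t ih =>
      cases t with
      | nil => simp [List.intersperse]
      | cons z zs => simp_all [List.intersperse]
  simp [PySem.Str.join, PySem.Chars.join, List.intercalate, flat_int]

-- keys A's left thumb can hold, resp. its right thumb
def pvLKeys : List PKey := [.star, .num 1, .num 4, .num 7, .num 2, .num 5, .num 8, .num 0]
def pvRKeys : List PKey := [.hash, .num 3, .num 6, .num 9, .num 2, .num 5, .num 8, .num 0]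

-- coordinate denoted by a thumb key
def pvCoord : PKey → Int × Int
  | .star => (3, 0)
  | .hash => (3, 2)
  | .num n => pvPosB n

-- the value pvBuild stores at key k (the loop body's value, as a function of the key)
def pvBody' (tie : Bool) (k : (Int × Int) × (Int × Int) × Int) :
    String × (Int × Int) × (Int × Int) :=
  if (pvPosB k.2.2).2 = 0 then ("L", pvPosB k.2.2, k.2.1)
  else if (pvPosB k.2.2).2 = 2 then ("R", k.1, pvPosB k.2.2)
  else if |(pvPosB k.2.2).1 - k.1.1| + |(pvPosB k.2.2).2 - k.1.2| <
            |(pvPosB k.2.2).1 - k.2.1.1| + |(pvPosB k.2.2).2 - k.2.1.2| ∨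
          (|(pvPosB k.2.2).1 - k.1.1| + |(pvPosB k.2.2).2 - k.1.2| =
            |(pvPosB k.2.2).1 - k.2.1.1| + |(pvPosB k.2.2).2 - k.2.1.2| ∧ tie = true) then
    ("L", pvPosB k.2.2, k.2.1)
  else ("R", k.1, pvPosB k.2.2)

-- the key set of the table
def pvTriples : List ((Int × Int) × (Int × Int) × Int) :=
  pvLefts.flatMap fun L => pvRights.flatMap fun R =>
    (PySem.List.pyRange 0 10 1).flatMap fun dd => [(L, R, dd)]

-- a fold of key-determined updates, characterised by the keys it covers
lemma pv_get?_foldl {α κ ν : Type} [BEq κ] [LawfulBEq κ]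
    (process : PySem.Dict κ ν → α → PySem.Dict κ ν) (keysOf : α → List κ) (w : κ → ν)
    (hstep : ∀ d a q, (process d a).get? q = if q ∈ keysOf a then some (w q) else d.get? q) :
    ∀ (xs : List α) (d : PySem.Dict κ ν) (q : κ),
      (xs.foldl process d).get? q = if q ∈ xs.flatMap keysOf then some (w q) else d.get? q := by
  intro xs
  induction xs with
  | nil => intro d q; simp
  | cons x t ih =>
    intro d q
    rw [List.foldl_cons, ih, hstep]
    by_cases h1 : q ∈ t.flatMap keysOf
    · simp [h1]
    · by_cases h2 : q ∈ keysOf x <;> simp [List.flatMap_cons, h1, h2]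

-- the innermost insert satisfies the characterisation
lemma pv_hstep_inner (tie : Bool) (L R : Int × Int) :
    ∀ (d : PySem.Dict ((Int × Int) × (Int × Int) × Int) (String × (Int × Int) × (Int × Int)))
      (dd : Int) (q : (Int × Int) × (Int × Int) × Int),
      ((fun d2 dd =>
        let p := pvPosB dd
        if p.2 = 0 then PySem.Dict.insert d2 (L, R, dd) ("L", p, R)
        else if p.2 = 2 then PySem.Dict.insert d2 (L, R, dd) ("R", L, p)
        else
          let dl := |p.1 - L.1| + |p.2 - L.2|
          let dr := |p.1 - R.1| + |p.2 - R.2|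
          if dl < dr ∨ (dl = dr ∧ tie = true) then PySem.Dict.insert d2 (L, R, dd) ("L", p, R)
          else PySem.Dict.insert d2 (L, R, dd) ("R", L, p)) d dd).get? q =
        if q ∈ [(L, R, dd)] then some (pvBody' tie q) else d.get? q := by
  intro d dd q
  by_cases hq : q = (L, R, dd)
  · subst hq
    simp only [pvBody', List.mem_singleton]
    split_ifs <;> simp [PySem.Dict.get?_insert_self, *]
  · simp only [List.mem_singleton, if_neg hq]
    split_ifs <;> exact PySem.Dict.get?_insert_of_ne _ _ hq

-- the whole table, characterised
lemma pv_get?_pvBuild (tie : Bool) (q : (Int × Int) × (Int × Int) × Int) :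
    (pvBuild tie).get? q = if q ∈ pvTriples then some (pvBody' tie q) else none := by
  have hG : ∀ (L R : Int × Int) d q,
      ((PySem.List.pyRange 0 10 1).foldl (fun d2 dd =>
        let p := pvPosB dd
        if p.2 = 0 then PySem.Dict.insert d2 (L, R, dd) ("L", p, R)
        else if p.2 = 2 then PySem.Dict.insert d2 (L, R, dd) ("R", L, p)
        else
          let dl := |p.1 - L.1| + |p.2 - L.2|
          let dr := |p.1 - R.1| + |p.2 - R.2|
          if dl < dr ∨ (dl = dr ∧ tie = true) then PySem.Dict.insert d2 (L, R, dd) ("L", p, R)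
          else PySem.Dict.insert d2 (L, R, dd) ("R", L, p)) d).get? q =
      if q ∈ (PySem.List.pyRange 0 10 1).flatMap (fun dd => [(L, R, dd)]) then
        some (pvBody' tie q) else d.get? q :=
    fun L R => pv_get?_foldl _ _ _ (pv_hstep_inner tie L R) _
  have hF : ∀ (L : Int × Int) d q,
      (pvRights.foldl (fun d1 R =>
        (PySem.List.pyRange 0 10 1).foldl (fun d2 dd =>
          let p := pvPosB dd
          if p.2 = 0 then PySem.Dict.insert d2 (L, R, dd) ("L", p, R)
          else if p.2 = 2 then PySem.Dict.insert d2 (L, R, dd) ("R", L, p)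
          else
            let dl := |p.1 - L.1| + |p.2 - L.2|
            let dr := |p.1 - R.1| + |p.2 - R.2|
            if dl < dr ∨ (dl = dr ∧ tie = true) then PySem.Dict.insert d2 (L, R, dd) ("L", p, R)
            else PySem.Dict.insert d2 (L, R, dd) ("R", L, p)) d1) d).get? q =
      if q ∈ pvRights.flatMap (fun R => (PySem.List.pyRange 0 10 1).flatMap fun dd => [(L, R, dd)]) then
        some (pvBody' tie q) else d.get? q :=
    fun L => pv_get?_foldl _ _ _ (fun d R q => hG L R d q) _
  have hTop := pv_get?_foldl _ _ _ (fun d L q => hF L d q) pvLefts PySem.Dict.empty q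
  rw [pvBuild, hTop, pvTriples]
  split_ifs <;> simp [PySem.Dict.get?_empty]

-- membership facts for reachable states
lemma pvCoordL_mem : ∀ k ∈ pvLKeys, pvCoord k ∈ pvLefts := by decide
lemma pvCoordR_mem : ∀ k ∈ pvRKeys, pvCoord k ∈ pvRights := by decide

lemma pv_mem_triples (lh rh : PKey) (i : Int) (hl : lh ∈ pvLKeys) (hr : rh ∈ pvRKeys)
    (hi : 0 ≤ i ∧ i < 10) : (pvCoord lh, pvCoord rh, i) ∈ pvTriples := by
  simp only [pvTriples, List.mem_flatMap, List.mem_singleton]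
  exact ⟨pvCoord lh, pvCoordL_mem lh hl, pvCoord rh, pvCoordR_mem rh hr, i,
    by rw [PySem.List.mem_pyRange_one]; omega, rfl⟩

lemma pv_not_mem_triples (q : (Int × Int) × (Int × Int) × Int) (h : q.2.2 < 0 ∨ 10 ≤ q.2.2) :
    q ∉ pvTriples := by
  simp only [pvTriples, List.mem_flatMap, List.mem_singleton]
  rintro ⟨L, -, R, -, dd, hdd, rfl⟩
  rw [PySem.List.mem_pyRange_one] at hdd
  simp at h
  omega

-- A's distance agrees with the arithmetic coordinates on every reachable pair
lemma pvDist_eq : ∀ i ∈ ([2, 5, 8, 0] : List Int), ∀ k ∈ pvLKeys ++ pvRKeys,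
    pvDistance (PKey.num i) k =
      |(pvPosB i).1 - (pvCoord k).1| + |(pvPosB i).2 - (pvCoord k).2| := by decide

-- relation between A's loop state and B's loop state
def pvInv (sa : String × PKey × PKey) (sb : List String × (Int × Int) × (Int × Int)) : Prop :=
  sa.1 = PySem.Str.join "" sb.1 ∧ sa.2.1 ∈ pvLKeys ∧ sa.2.2 ∈ pvRKeys ∧
    pvCoord sa.2.1 = sb.2.1 ∧ pvCoord sa.2.2 = sb.2.2

lemma pvStep_inv (hand : String) (sa : String × PKey × PKey)
    (sb : List String × (Int × Int) × (Int × Int)) (h : pvInv sa sb) (i : Int) :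
    pvInv (pvStepA hand sa i) (pvRunStep (pvBuild (hand == "left")) sb i) := by
  obtain ⟨sa1, lh, rh⟩ := sa
  obtain ⟨out, L, R⟩ := sb
  obtain ⟨h1, h2, h3, h4, h5⟩ := h
  simp only at h1 h4 h5
  subst h1 h4 h5
  by_cases hrange : 0 ≤ i ∧ i < 10
  · have hget : (pvBuild (hand == "left")).get? (pvCoord lh, pvCoord rh, i) =
        some (pvBody' (hand == "left") (pvCoord lh, pvCoord rh, i)) := by
      rw [pv_get?_pvBuild, if_pos (pv_mem_triples lh rh i h2 h3 hrange)]
    have hB : pvRunStep (pvBuild (hand == "left")) (out, pvCoord lh, pvCoord rh) i =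
        (out ++ [(pvBody' (hand == "left") (pvCoord lh, pvCoord rh, i)).1],
          (pvBody' (hand == "left") (pvCoord lh, pvCoord rh, i)).2.1,
          (pvBody' (hand == "left") (pvCoord lh, pvCoord rh, i)).2.2) := by
      simp only [pvRunStep, hget]
    rw [hB]
    by_cases hL : i = 1 ∨ i = 4 ∨ i = 7
    · rcases hL with rfl | rfl | rfl
      · rw [show pvStepA hand (PySem.Str.join "" out, lh, rh) 1 =
            (PySem.Str.join "" out ++ "L", PKey.num 1, rh) from rfl]
        exact ⟨(pvJoin_append out _).symm, (by decide : PKey.num 1 ∈ pvLKeys), h3, rfl, rfl⟩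
      · rw [show pvStepA hand (PySem.Str.join "" out, lh, rh) 4 =
            (PySem.Str.join "" out ++ "L", PKey.num 4, rh) from rfl]
        exact ⟨(pvJoin_append out _).symm, (by decide : PKey.num 4 ∈ pvLKeys), h3, rfl, rfl⟩
      · rw [show pvStepA hand (PySem.Str.join "" out, lh, rh) 7 =
            (PySem.Str.join "" out ++ "L", PKey.num 7, rh) from rfl]
        exact ⟨(pvJoin_append out _).symm, (by decide : PKey.num 7 ∈ pvLKeys), h3, rfl, rfl⟩
    · by_cases hR : i = 3 ∨ i = 6 ∨ i = 9
      · rcases hR with rfl | rfl | rfl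
        · rw [show pvStepA hand (PySem.Str.join "" out, lh, rh) 3 =
              (PySem.Str.join "" out ++ "R", lh, PKey.num 3) from rfl]
          exact ⟨(pvJoin_append out _).symm, h2, (by decide : PKey.num 3 ∈ pvRKeys), rfl, rfl⟩
        · rw [show pvStepA hand (PySem.Str.join "" out, lh, rh) 6 =
              (PySem.Str.join "" out ++ "R", lh, PKey.num 6) from rfl]
          exact ⟨(pvJoin_append out _).symm, h2, (by decide : PKey.num 6 ∈ pvRKeys), rfl, rfl⟩
        · rw [show pvStepA hand (PySem.Str.join "" out, lh, rh) 9 =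
              (PySem.Str.join "" out ++ "R", lh, PKey.num 9) from rfl]
          exact ⟨(pvJoin_append out _).symm, h2, (by decide : PKey.num 9 ∈ pvRKeys), rfl, rfl⟩
      · have him : i ∈ ([2, 5, 8, 0] : List Int) := by
          simp only [List.mem_cons]; omega
        have him' : i = 2 ∨ i = 5 ∨ i = 8 ∨ i = 0 := by simpa using him
        have hdl := pvDist_eq i him lh (by simp [h2])
        have hdr := pvDist_eq i him rh (by simp [h3])
        have hAform : pvStepA hand (PySem.Str.join "" out, lh, rh) i =
            if pvDistance (PKey.num i) lh > pvDistance (PKey.num i) rh then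
              (PySem.Str.join "" out ++ "R", lh, PKey.num i)
            else if pvDistance (PKey.num i) lh = pvDistance (PKey.num i) rh then
              if hand == "left" then (PySem.Str.join "" out ++ "L", PKey.num i, rh)
              else (PySem.Str.join "" out ++ "R", lh, PKey.num i)
            else (PySem.Str.join "" out ++ "L", PKey.num i, rh) := by
          rcases him' with rfl | rfl | rfl | rfl
          · rfl
          · rfl
          · rfl
          · rfl
        have hBform : pvBody' (hand == "left") (pvCoord lh, pvCoord rh, i) =
            if pvDistance (PKey.num i) lh < pvDistance (PKey.num i) rh ∨
               (pvDistance (PKey.num i) lh = pvDistance (PKey.num i) rh ∧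
                 (hand == "left") = true) then
              ("L", pvPosB i, pvCoord rh)
            else ("R", pvCoord lh, pvPosB i) := by
          rw [hdl, hdr]
          rcases him' with rfl | rfl | rfl | rfl
          · rfl
          · rfl
          · rfl
          · rfl
        rw [hAform, hBform]
        have hmL : PKey.num i ∈ pvLKeys := by
          rcases him' with rfl | rfl | rfl | rfl <;> decide
        have hmR : PKey.num i ∈ pvRKeys := by
          rcases him' with rfl | rfl | rfl | rfl <;> decide
        rcases lt_trichotomy (pvDistance (PKey.num i) lh) (pvDistance (PKey.num i) rh) with
          hlt | heq | hgt
        · rw [if_neg (by omega), if_neg (by omega), if_pos (Or.inl hlt)]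
          exact ⟨(pvJoin_append out _).symm, hmL, h3, rfl, rfl⟩
        · rw [if_neg (by omega), if_pos heq]
          by_cases hh : (hand == "left") = true
          · rw [if_pos hh, if_pos (Or.inr ⟨heq, hh⟩)]
            exact ⟨(pvJoin_append out _).symm, hmL, h3, rfl, rfl⟩
          · rw [if_neg hh, if_neg (by rintro (h | ⟨-, h⟩); omega; exact hh h)]
            exact ⟨(pvJoin_append out _).symm, h2, hmR, rfl, rfl⟩
        · rw [if_pos hgt, if_neg (by rintro (h | ⟨h, -⟩) <;> omega)]
          exact ⟨(pvJoin_append out _).symm, h2, hmR, rfl, rfl⟩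
  · -- i is not a keypad digit: A skips, and the key is absent from B's table
    have hnone : (pvBuild (hand == "left")).get? (pvCoord lh, pvCoord rh, i) = none := by
      rw [pv_get?_pvBuild, if_neg (pv_not_mem_triples _ (by simp only; omega))]
    have hBskip : pvRunStep (pvBuild (hand == "left")) (out, pvCoord lh, pvCoord rh) i =
        (out, pvCoord lh, pvCoord rh) := by
      simp only [pvRunStep, hnone]
    have c1 : ([(1 : Int), 4, 7].contains i) = false := by simp; omega
    have c2 : ([(3 : Int), 6, 9].contains i) = false := by simp; omega
    have c3 : ([(2 : Int), 5, 8, 0].contains i) = false := by simp; omega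
    have hAskip : pvStepA hand (PySem.Str.join "" out, lh, rh) i =
        (PySem.Str.join "" out, lh, rh) := by
      simp only [pvStepA, c1, c2, c3, Bool.false_eq_true, if_false]
    rw [hAskip, hBskip]
    exact ⟨rfl, h2, h3, rfl, rfl⟩

lemma pvFold_inv (hand : String) : ∀ (xs : List Int) sa sb, pvInv sa sb →
    pvInv (xs.foldl (pvStepA hand) sa) (xs.foldl (pvRunStep (pvBuild (hand == "left"))) sb) := by
  intro xs
  induction xs with
  | nil => intro sa sb h; exact h
  | cons x xs ih =>
    intro sa sb h
    exact ih _ _ (pvStep_inv hand sa sb h x)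

-- ===== VERDICT (by name: the statement is the Claim_ definition above) =====
theorem solution_spec : Claim_equal_solution := by
  intro numbers hand _
  unfold Spec_solution solution solution_alt
  exact (pvFold_inv hand numbers ("", PKey.star, PKey.hash)
    ([], ((3 : Int), (0 : Int)), ((3 : Int), (2 : Int)))
    ⟨rfl, by decide, by decide, rfl, rfl⟩).1
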